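-- pv_equiv track=rewrite | github.com/Cristobal-trigo/BigData | Parte 2/MapReduce.py | ShuffleSort
-- ===== SOURCE A (Python) =====
-- def ShuffleSort(lista):
--     lista_ordenada = []
--     for palabra in lista:
--         bandera = True
--         for elemento in lista_ordenada:
--             if palabra[0] == elemento[0]:
--                 elemento[1].append(1)
--                 bandera = False
--
--         if bandera:
--             lista_ordenada.append([palabra[0], [1]])
--
--
--     return lista_ordenada
-- ===== SOURCE B (Python) =====
-- def ShuffleSort(lista):
--     # Staged passes: list of first letters, their distinct values in order of
--     # first appearance, then one count per distinct letter rendered as [1]*c.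
--     keys = [palabra[0] for palabra in lista]
--     orden = []
--     for k in keys:
--         if k not in orden:
--             orden.append(k)
--     return [[k, [1] * keys.count(k)] for k in orden]
-- ===== Notes on version B (the rewrite author's own statement) =====
-- stated objective: simpler
-- what changed: Instead of A's single pass that mutates a growing grouped list (rescanning it and appending 1 to every matching group per word), B works in stages: project the list to its first letters, collect the distinct letters in first-appearance order, and render each group once from a per-letter count.
import Mathlib
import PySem

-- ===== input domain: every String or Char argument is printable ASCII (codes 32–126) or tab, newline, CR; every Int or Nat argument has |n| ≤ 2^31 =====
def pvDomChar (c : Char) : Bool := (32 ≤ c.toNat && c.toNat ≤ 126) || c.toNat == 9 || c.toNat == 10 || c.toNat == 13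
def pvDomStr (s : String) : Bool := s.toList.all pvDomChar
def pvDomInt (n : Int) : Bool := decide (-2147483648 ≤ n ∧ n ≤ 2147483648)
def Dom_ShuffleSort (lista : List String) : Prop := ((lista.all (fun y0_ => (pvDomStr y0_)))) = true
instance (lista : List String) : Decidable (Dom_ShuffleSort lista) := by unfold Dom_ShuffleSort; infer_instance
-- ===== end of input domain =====

-- B replaces A's single mutating-accumulator pass by staged passes: project to first letters,
-- collect the distinct letters in first-appearance order, render each group from a per-letter
-- count (objective: simpler).

-- ===== PORT A =====
-- A: for each word, scan the accumulated list, appending 1 to every entry with a matching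
-- first letter; if none matched, append a fresh [key, [1]] entry.
def ShuffleSort (lista : List String) : List (String × List Int) :=
  lista.foldl
    (fun lista_ordenada palabra =>
      match PySem.Str.pyGet? palabra 0 with
      | none => lista_ordenada       -- palabra[0] raises IndexError in Python; excluded by Pre_
      | some c =>
        let k := String.ofList [c]
        let bandera := !(lista_ordenada.any (fun elemento => elemento.1 == k))
        let lista_ordenada := lista_ordenada.map
          (fun elemento => if elemento.1 == k then (elemento.1, elemento.2 ++ [1]) else elemento)
        if bandera then lista_ordenada ++ [(k, [1])] else lista_ordenada)
    []

-- ===== PORT B =====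
-- B: keys = first letters (palabra[0] raises in Python on "", excluded by Pre_, hence filterMap);
-- orden = distinct keys in first-appearance order; render [1] * keys.count(k) per key.
def ShuffleSort_alt (lista : List String) : List (String × List Int) :=
  let keys := lista.filterMap
    (fun palabra => (PySem.Str.pyGet? palabra 0).map (fun c => String.ofList [c]))
  let orden := keys.foldl (fun orden k => if k ∈ orden then orden else orden ++ [k]) []
  orden.map (fun k => (k, List.replicate (PySem.List.count keys k) 1))

-- ===== PRECONDITION & SPEC =====
-- Pre_ excludes lists containing an empty string, on which Python A raises IndexError at palabra[0].
def Pre_ShuffleSort (lista : List String) : Prop := ∀ s ∈ lista, s ≠ ""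
instance (lista : List String) : Decidable (Pre_ShuffleSort lista) := by unfold Pre_ShuffleSort; infer_instance

def pvWitness_ShuffleSort : List String := ["apple", "ant", "bee"]

def Spec_ShuffleSort (lista : List String) (out : List (String × List Int)) : Prop := out = ShuffleSort_alt lista
instance (lista : List String) (out : List (String × List Int)) : Decidable (Spec_ShuffleSort lista out) := by unfold Spec_ShuffleSort; infer_instance

-- ===== CLAIM (what is proved, stated in full; the proofs are below) =====
def Claim_equal_ShuffleSort : Prop := ∀ (lista : List String), Dom_ShuffleSort lista → Pre_ShuffleSort lista → Spec_ShuffleSort lista (ShuffleSort lista)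

-- ===== LEMMAS AND PROOFS =====

-- A's fold step, expressed on the key alone.
def pvStepA (acc : List (String × List Int)) (k : String) : List (String × List Int) :=
  let bandera := !(acc.any (fun e => e.1 == k))
  let acc := acc.map (fun e => if e.1 == k then (e.1, e.2 ++ [1]) else e)
  if bandera then acc ++ [(k, [1])] else acc

-- B's first-appearance dedup.
def pvOrden (ks : List String) : List String :=
  ks.foldl (fun orden k => if k ∈ orden then orden else orden ++ [k]) []

theorem pvOrden_concat (ks : List String) (k : String) :
    pvOrden (ks ++ [k]) = if k ∈ pvOrden ks then pvOrden ks else pvOrden ks ++ [k] := by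
  simp [pvOrden, List.foldl_append]

theorem mem_pvOrden (ks : List String) (k : String) : k ∈ pvOrden ks ↔ k ∈ ks := by
  have h : ∀ (l acc : List String),
      k ∈ l.foldl (fun orden k => if k ∈ orden then orden else orden ++ [k]) acc ↔
        k ∈ acc ∨ k ∈ l := by
    intro l
    induction l with
    | nil => simp
    | cons x xs ih =>
      intro acc
      simp only [List.foldl_cons]
      split_ifs with hx
      · rw [ih]
        constructor
        · rintro (h | h)
          · exact Or.inl h
          · exact Or.inr (List.mem_cons_of_mem _ h)
        · rintro (h | h)
          · exact Or.inl h
          · rcases List.mem_cons.mp h with rfl | h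
            · exact Or.inl hx
            · exact Or.inr h
      · rw [ih]
        simp only [List.mem_append, List.mem_cons]
        tauto
  simpa using h ks []

-- The invariant: A's fold over the key list IS B's staged rendering.
theorem pvFold_eq (ks : List String) :
    ks.foldl pvStepA [] = (pvOrden ks).map (fun k => (k, List.replicate (ks.count k) 1)) := by
  induction ks using List.reverseRecOn with
  | nil => rfl
  | append_singleton ks k ih =>
    rw [List.foldl_append, List.foldl_cons, List.foldl_nil, ih, pvOrden_concat]
    have hany : ((pvOrden ks).map (fun k' => (k', List.replicate (ks.count k') (1 : Int)))).any
        (fun e => e.1 == k) = decide (k ∈ pvOrden ks) := by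
      rw [Bool.eq_iff_iff]
      simp [List.any_map, Function.comp_def]
    by_cases hk : k ∈ pvOrden ks
    · -- key already seen: A appends 1 to exactly the matching entries
      rw [if_pos hk]
      unfold pvStepA
      rw [hany]
      simp only [hk, decide_true, Bool.not_true, if_neg (Bool.false_ne_true), List.map_map]
      apply List.map_congr_left
      intro k' _
      simp only [Function.comp, beq_iff_eq, List.count_append]
      by_cases hkk : k' = k
      · subst hkk
        simp [List.replicate_succ']
      · simp [hkk, Ne.symm hkk]
    · -- fresh key: no entry matches; both sides append the new singleton group
      rw [if_neg hk]
      have hks : k ∉ ks := fun h => hk ((mem_pvOrden ks k).mpr h)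
      unfold pvStepA
      rw [hany]
      simp only [hk, decide_false, Bool.not_false, List.map_map, List.map_append]
      rw [if_pos (by trivial)]
      congr 1
      · apply List.map_congr_left
        intro k' hk'
        have hne : k' ≠ k := fun h => hk (h ▸ hk')
        have hcnt : (ks ++ [k]).count k' = ks.count k' := by
          simp [List.count_append, Ne.symm hne]
        simp [Function.comp, hne, hcnt]
      · have hc : ks.count k = 0 := List.count_eq_zero_of_not_mem hks
        simp [hc]

-- A's fold over the word list equals the fold of pvStepA over the extracted key list.
theorem pvA_keys (lista : List String) (acc : List (String × List Int)) :
    lista.foldl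
      (fun lista_ordenada palabra =>
        match PySem.Str.pyGet? palabra 0 with
        | none => lista_ordenada
        | some c =>
          let k := String.ofList [c]
          let bandera := !(lista_ordenada.any (fun elemento => elemento.1 == k))
          let lista_ordenada := lista_ordenada.map
            (fun elemento => if elemento.1 == k then (elemento.1, elemento.2 ++ [1]) else elemento)
          if bandera then lista_ordenada ++ [(k, [1])] else lista_ordenada)
      acc
    = (lista.filterMap
        (fun palabra => (PySem.Str.pyGet? palabra 0).map (fun c => String.ofList [c]))).foldl
        pvStepA acc := by
  induction lista generalizing acc with
  | nil => rfl
  | cons palabra rest ih =>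
    simp only [List.foldl_cons, List.filterMap_cons]
    cases h : PySem.Str.pyGet? palabra 0 with
    | none => exact ih acc
    | some c => simp only [Option.map_some, List.foldl_cons]; exact ih _

-- ===== VERDICT (by name: the statement is the Claim_ definition above) =====
theorem ShuffleSort_spec : Claim_equal_ShuffleSort := by
  intro lista _ _
  unfold Spec_ShuffleSort ShuffleSort ShuffleSort_alt
  rw [pvA_keys, pvFold_eq]
  simp [pvOrden, PySem.List.count_eq]
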